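-- pv_equiv track=rewrite | github.com/echocall/STAT | handlers/assethandler.py | sort_assets_by_category
-- ===== SOURCE A (Python) =====
-- def sort_assets_by_category(assets_to_sort: dict) -> dict:
--         sorted_assets = {}
--         # Make a set of all the different category types.
--         categories_set = {}
--         categories_list = []
--
--         categories_set = set(categories_set)
--
--         for key in assets_to_sort:
--             if assets_to_sort[key]['category'] not in categories_set:
--                 categories_set.add(assets_to_sort[key]['category'])
--
--        # Change set into list for more consistent sorting.
--         categories_list = list(categories_set)
--         categories_list.sort()
--
--         # now that we have the set, create dictionary.
--         sorted_assets = asset_sorter(assets_to_sort, categories_list, 'category')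
--
--         return sorted_assets
--
-- def asset_sorter(assets_to_sort: dict, sort_by_list: list, sort_field: str) -> dict:
--         #sorted_assets = {'category':[<asset1>,<asset2>]}
--         sorted_assets = {}
--
--         # initialize the dictionary of lists by field
--         for each in sort_by_list:
--             sorted_assets[each] = []
--         for key in assets_to_sort:
--         # if the asset's category is in the sorted dictionary, add it.
--             if assets_to_sort[key][sort_field] in sorted_assets:
--                 # get the field we're sorting into
--                 sort_field_name = assets_to_sort[key][sort_field]
--                 # get the asset and add it to the dictionary for that field.
--                 sorted_assets[sort_field_name].append(assets_to_sort[key])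
--         return sorted_assets
-- ===== SOURCE B (Python) =====
-- def sort_assets_by_category(assets_to_sort: dict) -> dict:
--     # One grouping pass, then sort the keys at the end.
--     groups = {}
--     for asset in assets_to_sort.values():
--         groups.setdefault(asset['category'], []).append(asset)
--     return {cat: groups[cat] for cat in sorted(groups)}
-- ===== Notes on version B (the rewrite author's own statement) =====
-- stated objective: simpler
-- what changed: Replaces A's two-pass structure (collect categories into a set, sort, pre-initialize empty lists per category, then refill by re-scanning the assets with a membership guard) with one grouping pass that appends each asset to its category bucket as it is seen, followed by a single sort of the keys at the end.
import Mathlib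
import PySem

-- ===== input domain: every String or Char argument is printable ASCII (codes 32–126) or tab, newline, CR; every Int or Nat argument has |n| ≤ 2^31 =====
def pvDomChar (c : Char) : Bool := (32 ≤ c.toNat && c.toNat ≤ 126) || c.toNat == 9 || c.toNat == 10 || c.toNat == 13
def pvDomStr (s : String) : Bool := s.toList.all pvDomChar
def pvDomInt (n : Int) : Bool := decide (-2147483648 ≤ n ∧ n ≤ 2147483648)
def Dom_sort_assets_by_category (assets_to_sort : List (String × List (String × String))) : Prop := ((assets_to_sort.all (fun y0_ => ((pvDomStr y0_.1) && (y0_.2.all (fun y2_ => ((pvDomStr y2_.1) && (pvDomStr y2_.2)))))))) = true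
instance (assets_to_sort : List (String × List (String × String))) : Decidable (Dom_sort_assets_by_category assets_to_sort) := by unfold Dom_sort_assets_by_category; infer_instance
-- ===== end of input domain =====

-- B groups the assets in one pass (appending each asset to its category bucket as it is seen)
-- and sorts the keys once at the end, instead of A's collect-set / sort / pre-initialize-empty-
-- lists / refill two-pass structure.  Return-value equivalence only (neither mutates its input).
-- Both dict arguments are modelled through PySem.Dict.ofList (the Python callee receives real
-- dicts, so duplicate keys in the association lists collapse last-wins, exactly as ofList does);
-- asset['category'] is ported as getD with default "" — exact under Pre_, which guarantees the
-- key is present (the Python raises KeyError otherwise).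

-- ===== PORT A =====
def asset_sorter (assets_to_sort : PySem.Dict String (List (String × String)))
    (sort_by_list : List String) (sort_field : String) :
    PySem.Dict String (List (List (String × String))) :=
  -- initialize the dictionary of lists by field
  let init := sort_by_list.foldl (fun sorted_assets each => sorted_assets.insert each []) PySem.Dict.empty
  -- for key in assets_to_sort: if assets_to_sort[key][sort_field] in sorted_assets: append
  assets_to_sort.items.foldl
    (fun sorted_assets p =>
      if sorted_assets.contains ((PySem.Dict.ofList p.2).getD sort_field "") then
        sorted_assets.modify ((PySem.Dict.ofList p.2).getD sort_field "") []
          (fun t => t ++ [(PySem.Dict.ofList p.2).items])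
      else sorted_assets)
    init

def sort_assets_by_category (assets_to_sort : List (String × List (String × String))) : List (String × List (List (String × String))) :=
  let d := PySem.Dict.ofList assets_to_sort
  -- for key in assets_to_sort: if cat not in categories_set: categories_set.add(cat)
  let categories_set := d.items.foldl
    (fun s p =>
      if !(PySem.Set.contains s ((PySem.Dict.ofList p.2).getD "category" "")) then
        PySem.Set.add s ((PySem.Dict.ofList p.2).getD "category" "")
      else s)
    PySem.Set.empty
  -- categories_list = list(categories_set); categories_list.sort()  (sorted(set): order-safe)
  let categories_list := PySem.List.sorted categories_set (fun x => x) false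
  (asset_sorter d categories_list "category").items

-- ===== PORT B =====
def sort_assets_by_category_alt (assets_to_sort : List (String × List (String × String))) : List (String × List (List (String × String))) :=
  let d := PySem.Dict.ofList assets_to_sort
  -- for asset in assets_to_sort.values(): groups.setdefault(asset['category'], []).append(asset)
  let groups := d.values.foldl
    (fun g a =>
      g.modify ((PySem.Dict.ofList a).getD "category" "") []
        (fun t => t ++ [(PySem.Dict.ofList a).items]))
    PySem.Dict.empty
  -- {cat: groups[cat] for cat in sorted(groups)}
  (PySem.List.sorted (PySem.Dict.keys groups) (fun x => x) false).map (fun c => (c, groups.getD c []))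

-- ===== PRECONDITION & SPEC =====
-- Pre_ excludes exactly the inputs on which the Python A raises KeyError: some asset without a 'category' key.
def Pre_sort_assets_by_category (assets_to_sort : List (String × List (String × String))) : Prop :=
  ∀ p ∈ assets_to_sort, "category" ∈ p.2.map Prod.fst
instance (assets_to_sort : List (String × List (String × String))) : Decidable (Pre_sort_assets_by_category assets_to_sort) := by unfold Pre_sort_assets_by_category; infer_instance
def pvWitness_sort_assets_by_category : (List (String × List (String × String))) :=
  [("a1", [("category", "x"), ("name", "n1")]), ("a2", [("category", "x")])]

def Spec_sort_assets_by_category (assets_to_sort : List (String × List (String × String))) (out : List (String × List (List (String × String)))) : Prop := out = sort_assets_by_category_alt assets_to_sort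
instance (assets_to_sort : List (String × List (String × String))) (out : List (String × List (List (String × String)))) : Decidable (Spec_sort_assets_by_category assets_to_sort out) := by unfold Spec_sort_assets_by_category; infer_instance

-- ===== CLAIM (what is proved, stated in full; the proofs are below) =====
def Claim_equal_sort_assets_by_category : Prop := ∀ (assets_to_sort : List (String × List (String × String))), Dom_sort_assets_by_category assets_to_sort → Pre_sort_assets_by_category assets_to_sort → Spec_sort_assets_by_category assets_to_sort (sort_assets_by_category assets_to_sort)

-- ===== LEMMAS AND PROOFS =====

theorem set_if_add (s : PySem.Set String) (x : String) :
    (if !(PySem.Set.contains s x) then PySem.Set.add s x else s) = PySem.Set.add s x := by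
  simp only [PySem.Set.add]
  cases h : PySem.Set.contains s x <;> simp

theorem update_of_forall_mem (l : List String) (s : PySem.Set String) (h : ∀ x ∈ l, x ∈ s) :
    PySem.Set.update s l = s := by
  induction l generalizing s with
  | nil => rfl
  | cons x t ih =>
    have hx : PySem.Set.add s x = s := PySem.Set.add_of_mem (h x (by simp))
    rw [PySem.Set.update_cons, hx, ih s (fun y hy => h y (by simp [hy]))]

theorem guard_removal {V : Type} (l : List (String × V)) (key : String × V → String)
    (v : String × V → List (String × String))
    (d : PySem.Dict String (List (List (String × String))))
    (h : ∀ x ∈ l, d.contains (key x) = true) :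
    l.foldl (fun sa x => if sa.contains (key x) then
        sa.modify (key x) [] (fun t => t ++ [v x]) else sa) d
    = l.foldl (fun sa x => sa.modify (key x) [] (fun t => t ++ [v x])) d := by
  induction l generalizing d with
  | nil => rfl
  | cons x t ih =>
    simp only [List.foldl_cons, h x (by simp), if_true]
    exact ih _ (fun y hy => by
      rw [PySem.Dict.contains_modify]
      simp [h y (List.mem_cons_of_mem _ hy)])

-- A's and B's pipelines agree for ANY item list and any category/normalization functions.
theorem main_general (items : List (String × List (String × String)))
    (cat : List (String × String) → String)
    (nrm : List (String × String) → List (String × String)) :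
    (items.foldl
        (fun sa p => if sa.contains (cat p.2) then
            sa.modify (cat p.2) [] (fun t => t ++ [nrm p.2]) else sa)
        ((PySem.List.sorted
            (items.foldl (fun s p => if !(PySem.Set.contains s (cat p.2)) then
                PySem.Set.add s (cat p.2) else s) PySem.Set.empty)
            (fun x => x) false).foldl
          (fun sa each => sa.insert each []) PySem.Dict.empty)).items
    =
    (PySem.List.sorted
        (PySem.Dict.keys ((items.map (fun p => p.2)).foldl
          (fun g a => g.modify (cat a) [] (fun t => t ++ [nrm a])) PySem.Dict.empty))
        (fun x => x) false).map
      (fun c => (c, ((items.map (fun p => p.2)).foldl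
          (fun g a => g.modify (cat a) [] (fun t => t ++ [nrm a])) PySem.Dict.empty).getD c [])) := by
  -- B's grouping fold, re-indexed over the items
  rw [List.foldl_map]
  -- A's category set is set(categories), built left to right
  have hset : items.foldl (fun s p => if !(PySem.Set.contains s (cat p.2)) then
      PySem.Set.add s (cat p.2) else s) PySem.Set.empty
      = PySem.Set.ofList (items.map (fun p => cat p.2)) := by
    have h1 : (fun (s : PySem.Set String) (p : String × List (String × String)) =>
        if !(PySem.Set.contains s (cat p.2)) then PySem.Set.add s (cat p.2) else s)
        = fun s p => PySem.Set.add s (cat p.2) := by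
      funext s p; exact set_if_add s (cat p.2)
    rw [h1, PySem.Set.ofList_eq_foldl, List.foldl_map]
    rfl
  rw [hset]
  -- B's group keys are the same set
  have hkeysB : PySem.Dict.keys (items.foldl
      (fun g p => g.modify (cat p.2) [] (fun t => t ++ [nrm p.2])) PySem.Dict.empty)
      = PySem.Set.ofList (items.map (fun p => cat p.2)) := by
    rw [PySem.Dict.keys_foldl_modify_key, PySem.Dict.keys_empty, PySem.Set.update_nil_left]
  rw [hkeysB]
  -- the sorted category list
  set CL := PySem.List.sorted (PySem.Set.ofList (items.map (fun p => cat p.2))) (fun x => x) false with hCL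
  have hndCL : CL.Nodup :=
    (PySem.List.sorted_perm _ _ _).nodup_iff.mpr (PySem.Set.nodup_ofList _)
  have hmemCL : ∀ p ∈ items, cat p.2 ∈ CL := by
    intro p hp
    rw [hCL, PySem.List.mem_sorted, PySem.Set.mem_ofList]
    exact List.mem_map_of_mem hp
  -- the pre-initialized dict: one empty bucket per category
  set init := CL.foldl (fun sa each => sa.insert each []) PySem.Dict.empty with hinit
  have hinit_items : init.items
      = CL.map (fun c => (c, ([] : List (List (String × String))))) := by
    rw [hinit]
    have h := PySem.Dict.items_foldl_insert_fresh (d := PySem.Dict.empty) (l := CL)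
      (k := fun a => a) (v := fun _ => ([] : List (List (String × String))))
      (by intro a _; simp) (by simpa using hndCL)
    simpa using h
  have hinit_keys : init.keys = CL := by
    have h : PySem.Dict.keys init = init.items.map (fun x => x.1) := rfl
    rw [h, hinit_items, List.map_map]
    exact List.map_id' _
  -- the membership guard in asset_sorter always fires
  have hguard : ∀ p ∈ items, init.contains (cat p.2) = true := by
    intro p hp
    rw [PySem.Dict.contains_iff_mem_keys, hinit_keys]
    exact hmemCL p hp
  rw [guard_removal items (fun p => cat p.2) (fun p => nrm p.2) init hguard]
  -- the final dict of A: keys stay CL, nodup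
  have hkeysF : (items.foldl (fun sa p => sa.modify (cat p.2) [] (fun t => t ++ [nrm p.2])) init).keys = CL := by
    rw [PySem.Dict.keys_foldl_modify_key, hinit_keys]
    exact update_of_forall_mem _ _ (by
      intro x hx
      rcases List.mem_map.mp hx with ⟨p, hp, rfl⟩
      exact hmemCL p hp)
  have hndF : (items.foldl (fun sa p => sa.modify (cat p.2) [] (fun t => t ++ [nrm p.2])) init).keys.Nodup := by
    rw [hkeysF]; exact hndCL
  rw [PySem.Dict.items_eq_map_keys _ hndF ([] : List (List (String × String))), hkeysF]
  -- pointwise: both buckets are the filtered, in-order assets of that category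
  refine List.map_congr_left ?_
  intro c hc
  have hpair : ∀ (d0 : PySem.Dict String (List (List (String × String)))),
      items.foldl (fun sa p => sa.modify (cat p.2) [] (fun t => t ++ [nrm p.2])) d0
      = (items.map (fun p => (cat p.2, nrm p.2))).foldl
          (fun d q => d.modify q.1 [] (fun t => t ++ [q.2])) d0 := by
    intro d0; rw [List.foldl_map]
  have hinit_getD : init.getD c ([] : List (List (String × String))) = [] := by
    have h1 : (c, ([] : List (List (String × String)))) ∈ init.items := by
      rw [hinit_items]; exact List.mem_map_of_mem hc
    have h2 : init.keys.Nodup := by rw [hinit_keys]; exact hndCL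
    exact PySem.Dict.getD_of_mem_items init h1 h2 _
  rw [hpair init, hpair PySem.Dict.empty, PySem.Dict.getD_foldl_modify_append,
      PySem.Dict.getD_foldl_modify_append, hinit_getD, PySem.Dict.getD_empty]

theorem sort_assets_by_category_spec' (xs : List (String × List (String × String))) :
    sort_assets_by_category xs = sort_assets_by_category_alt xs := by
  unfold sort_assets_by_category sort_assets_by_category_alt asset_sorter
  exact main_general (PySem.Dict.ofList xs).items
    (fun a => (PySem.Dict.ofList a).getD "category" "")
    (fun a => (PySem.Dict.ofList a).items)

-- ===== VERDICT (by name: the statement is the Claim_ definition above) =====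
theorem sort_assets_by_category_spec : Claim_equal_sort_assets_by_category := by
  intro xs _ _
  exact sort_assets_by_category_spec' xs
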